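-- pv_equiv track=rewrite | github.com/yyamasak02/algorithm_load | atcoder/ABC/contest_407/d/main.py | get_max_xor
-- ===== SOURCE A (Python) =====
-- def get_max_xor(fields, w, h):
--     max_xor = 0
--     current_xor = 0
--     for i in range(h):
--         for j in range(w):
--             current_xor ^= fields[i][j]
--     max_xor = max(max_xor, current_xor)
--
--     for mask in range(1 << (h * w)):
--         used = [[False for _ in range(w)] for _ in range(h)]
--         valid = True
--         domino_count = 0
--         for i in range(h):
--             for j in range(w):
--                 if not valid:
--                     break
--                 pos = i * w + j
--                 if (mask >> pos) & 1:
--                     if j + 1 < w and not used[i][j] and not used[i][j+1]: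
--                         used[i][j] = used[i][j+1] = True
--                         domino_count += 1
--                     elif i + 1 < h and not used[i][j] and not used[i+1][j]:
--                         used[i][j] = used[i+1][j] = True
--                         domino_count += 1
--                     else:
--                         valid = False
--                         break
--         if not valid:
--             continue
--         current_xor = 0
--         for i in range(h):
--             for j in range(w):
--                 if not used[i][j]:
--                     current_xor ^= fields[i][j]
--         max_xor = max(max_xor, current_xor)
--     return max_xor
-- ===== SOURCE B (Python) =====
-- def get_max_xor(fields, w, h):
--     n = h * w
--
--     def full_xor(used):
--         x = 0
--         for i in range(h):
--             for j in range(w):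
--                 if not used[i][j]:
--                     x ^= fields[i][j]
--         return x
--
--     def place(used, i, j):
--         if j + 1 < w and not used[i][j] and not used[i][j + 1]:
--             new = [row[:] for row in used]
--             new[i][j] = new[i][j + 1] = True
--             return new
--         if i + 1 < h and not used[i][j] and not used[i + 1][j]:
--             new = [row[:] for row in used]
--             new[i][j] = new[i + 1][j] = True
--             return new
--         return None
--
--     def go(pos, used):
--         if n <= pos:
--             return full_xor(used)
--         i, j = divmod(pos, w)
--         best = go(pos + 1, used)
--         placed = place(used, i, j)
--         if placed is not None:
--             best = max(best, go(pos + 1, placed))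
--         return best
--
--     return max(0, go(0, [[False] * w for _ in range(h)]))
-- ===== Notes on version B (the rewrite author's own statement) =====
-- stated objective: faster
-- what changed: Replaces the loop over all 2^(h*w) bitmasks (each greedily decoded and often rejected as invalid) by a recursive backtracking over cells in row-major order that only ever branches into valid placements (leave the cell, or place the one domino A's greedy orientation rule would place), so only prefixes of valid placements are visited.
import Mathlib
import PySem

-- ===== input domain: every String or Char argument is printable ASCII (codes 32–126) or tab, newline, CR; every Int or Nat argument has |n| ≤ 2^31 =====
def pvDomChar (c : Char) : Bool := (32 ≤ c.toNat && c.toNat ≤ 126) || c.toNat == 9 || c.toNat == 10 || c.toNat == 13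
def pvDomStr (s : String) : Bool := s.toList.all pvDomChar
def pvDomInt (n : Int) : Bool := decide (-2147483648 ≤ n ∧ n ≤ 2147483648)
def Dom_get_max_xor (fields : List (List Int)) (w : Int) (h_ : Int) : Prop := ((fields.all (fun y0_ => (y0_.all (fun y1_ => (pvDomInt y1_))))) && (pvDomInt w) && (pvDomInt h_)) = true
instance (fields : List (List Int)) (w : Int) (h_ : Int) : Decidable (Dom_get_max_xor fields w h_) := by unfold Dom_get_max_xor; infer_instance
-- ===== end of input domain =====

-- B replaces A's loop over all 2^(h*w) masks by recursive backtracking over the cells that only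
-- visits prefixes of valid domino placements, skipping the masks A decodes and rejects.

-- ===== PORT A =====
-- fields[i][j] / used[i][j] are read with pyGetD (in range under Pre_; Python's IndexError inputs are excluded there);
-- `1 << (h*w)` is 2 ^ (h_*w).toNat (Python raises ValueError for a negative shift — excluded by Pre_);
-- `(mask >> pos) & 1` is a Nat shift on mask.toNat (mask ≥ 0 in the loop, pos = i*w+j ≥ 0 there).
def pvCellA (fields : List (List Int)) (i j : Int) : Int :=
  PySem.List.pyGetD (PySem.List.pyGetD fields i []) j 0

def pvUsedA (used : List (List Bool)) (i j : Int) : Bool :=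
  PySem.List.pyGetD (PySem.List.pyGetD used i []) j false

-- `used[i][j] = True` (row fetched, entry set, row stored back)
def pvSetA (used : List (List Bool)) (i j : Int) : List (List Bool) :=
  used.set i.toNat ((PySem.List.pyGetD used i []).set j.toNat true)

-- the inner `for j in range(w)` of the mask loop; the two `break`s are the early returns
def pvInnerA (w h_ : Int) (mask : Int) (i : Int) :
    List Int → List (List Bool) × Bool × Int → List (List Bool) × Bool × Int
  | [], s => s
  | j :: js, (used, valid, cnt) =>
    if valid = false then (used, valid, cnt)                       -- if not valid: break
    else if (mask.toNat >>> (i * w + j).toNat) &&& 1 = 1 then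
      if j + 1 < w ∧ pvUsedA used i j = false ∧ pvUsedA used i (j + 1) = false then
        pvInnerA w h_ mask i js (pvSetA (pvSetA used i j) i (j + 1), valid, cnt + 1)
      else if i + 1 < h_ ∧ pvUsedA used i j = false ∧ pvUsedA used (i + 1) j = false then
        pvInnerA w h_ mask i js (pvSetA (pvSetA used i j) (i + 1) j, valid, cnt + 1)
      else (used, false, cnt)                                      -- valid = False; break
    else pvInnerA w h_ mask i js (used, valid, cnt)

-- `[[False for _ in range(w)] for _ in range(h)]`
def pvGridA (w h_ : Int) : List (List Bool) :=
  (PySem.List.pyRange 0 h_ 1).map (fun _ => (PySem.List.pyRange 0 w 1).map (fun _ => false))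

-- one iteration of the mask loop up to the validity test: (used, valid, domino_count)
def pvMaskA (w h_ : Int) (mask : Int) : List (List Bool) × Bool × Int :=
  (PySem.List.pyRange 0 h_ 1).foldl
    (fun s i => pvInnerA w h_ mask i (PySem.List.pyRange 0 w 1) s)
    (pvGridA w h_, true, 0)

-- the final current_xor double loop of a valid mask
def pvXorUnusedA (fields : List (List Int)) (w h_ : Int) (used : List (List Bool)) : Int :=
  (PySem.List.pyRange 0 h_ 1).foldl (fun x i =>
    (PySem.List.pyRange 0 w 1).foldl (fun x j =>
      if pvUsedA used i j = false then PySem.Int.bxor x (pvCellA fields i j) else x) x) 0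

-- the first current_xor double loop (xor of every cell)
def pvXorAllA (fields : List (List Int)) (w h_ : Int) : Int :=
  (PySem.List.pyRange 0 h_ 1).foldl (fun x i =>
    (PySem.List.pyRange 0 w 1).foldl (fun x j =>
      PySem.Int.bxor x (pvCellA fields i j)) x) 0

def get_max_xor (fields : List (List Int)) (w : Int) (h_ : Int) : Int :=
  (PySem.List.pyRange 0 ((2 ^ (h_ * w).toNat : Nat) : Int) 1).foldl
    (fun mx mask =>
      match pvMaskA w h_ mask with
      | (used, valid, _) =>
        if valid = true then max mx (pvXorUnusedA fields w h_ used) else mx)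
    (max 0 (pvXorAllA fields w h_))

-- ===== PORT B =====
-- Source B's full_xor and the fields[i][j]/used[i][j] leaf accessors are the same one-liners as in A:
-- pvCellA/pvUsedA/pvSetA/pvXorUnusedA above are reused (full_xor(used) = pvXorUnusedA fields w h_).

-- place(used, i, j) (the row copies of Source B are the persistent update here)
def pvPlaceB (w h_ : Int) (used : List (List Bool)) (i j : Int) : Option (List (List Bool)) :=
  if j + 1 < w ∧ pvUsedA used i j = false ∧ pvUsedA used i (j + 1) = false then
    some (pvSetA (pvSetA used i j) i (j + 1))
  else if i + 1 < h_ ∧ pvUsedA used i j = false ∧ pvUsedA used (i + 1) j = false then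
    some (pvSetA (pvSetA used i j) (i + 1) j)
  else none

-- go(pos, used), by structural recursion on the fuel (n - pos).toNat (= the number of remaining cells;
-- fuel 0 is exactly the `n <= pos` base case); `i, j = divmod(pos, w)` — w ≠ 0 whenever reached under Pre_
def pvGoB (fields : List (List Int)) (w h_ n : Int) : Nat → Int → List (List Bool) → Int
  | 0, _, used => pvXorUnusedA fields w h_ used
  | fuel + 1, pos, used =>
    if n ≤ pos then pvXorUnusedA fields w h_ used
    else
      let ij := (PySem.Int.divmod? pos w).getD (0, 0)
      let best := pvGoB fields w h_ n fuel (pos + 1) used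
      match pvPlaceB w h_ used ij.1 ij.2 with
      | some placed => max best (pvGoB fields w h_ n fuel (pos + 1) placed)
      | none => best

def get_max_xor_alt (fields : List (List Int)) (w : Int) (h_ : Int) : Int :=
  max 0 (pvGoB fields w h_ (h_ * w) (h_ * w).toNat 0
    ((PySem.List.pyRange 0 h_ 1).map (fun _ => (PySem.List.pyRange 0 w 1).map (fun _ => false))))

-- ===== PRECONDITION & SPEC =====
-- Exactly the inputs where the Python A returns: h_*w ≥ 0 (else `1 << (h*w)` raises ValueError), and when
-- the grid is nonempty the first h_ rows must exist and be at least w wide (else fields[i][j] raises IndexError).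
def Pre_get_max_xor (fields : List (List Int)) (w : Int) (h_ : Int) : Prop :=
  0 ≤ h_ * w ∧
  (0 < h_ ∧ 0 < w →
    h_ ≤ (fields.length : Int) ∧ ∀ row ∈ fields.take h_.toNat, w ≤ (row.length : Int))

instance (fields : List (List Int)) (w : Int) (h_ : Int) : Decidable (Pre_get_max_xor fields w h_) := by
  unfold Pre_get_max_xor; infer_instance

def pvWitness_get_max_xor : List (List Int) × Int × Int := ([[3, 5], [6, 1]], 2, 2)

def Spec_get_max_xor (fields : List (List Int)) (w : Int) (h_ : Int) (out : Int) : Prop := out = get_max_xor_alt fields w h_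
instance (fields : List (List Int)) (w : Int) (h_ : Int) (out : Int) : Decidable (Spec_get_max_xor fields w h_ out) := by unfold Spec_get_max_xor; infer_instance

-- ===== CLAIM (what is proved, stated in full; the proofs are below) =====
def Claim_equal_get_max_xor : Prop := ∀ (fields : List (List Int)) (w : Int) (h_ : Int), Dom_get_max_xor fields w h_ → Pre_get_max_xor fields w h_ → Spec_get_max_xor fields w h_ (get_max_xor fields w h_)

-- ===== LEMMAS AND PROOFS =====

-- ---- generic max-of-option folds ----
def pvOptMax (a : Int) : Option Int → Int
  | none => a
  | some v => max a v

theorem pvOptMax_swap (x : Int) (o p : Option Int) :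
    pvOptMax (pvOptMax x o) p = pvOptMax (pvOptMax x p) o := by
  cases o <;> cases p <;> simp [pvOptMax, max_right_comm]

theorem pvFold_pull (f : Nat → Option Int) (l : List Nat) : ∀ (x : Int) (o : Option Int),
    l.foldl (fun a m => pvOptMax a (f m)) (pvOptMax x o)
      = pvOptMax (l.foldl (fun a m => pvOptMax a (f m)) x) o := by
  induction l with
  | nil => intro x o; rfl
  | cons m t ih =>
    intro x o
    simp only [List.foldl_cons, pvOptMax_swap x o (f m)]
    exact ih _ _

theorem pvFold_interleave (e o : Nat → Option Int) (l : List Nat) : ∀ (acc : Int),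
    l.foldl (fun a m => pvOptMax (pvOptMax a (e m)) (o m)) acc
      = l.foldl (fun a m => pvOptMax a (o m)) (l.foldl (fun a m => pvOptMax a (e m)) acc) := by
  induction l with
  | nil => intro acc; rfl
  | cons m t ih =>
    intro acc
    simp only [List.foldl_cons]
    rw [ih, pvFold_pull]

-- ---- the shared search model: masks consumed bit by bit vs. branching recursion ----
def pvProcM {σ : Type} (place : Int → σ → Option σ) : Nat → Int → Nat → σ → Option σ
  | 0, _, _, s => some s
  | k+1, pos, m, s =>
    if m % 2 = 1 then (place pos s).bind (pvProcM place k (pos + 1) (m / 2))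
    else pvProcM place k (pos + 1) (m / 2) s

def pvBestR {σ : Type} (place : Int → σ → Option σ) (out : σ → Int) : Nat → Int → σ → Int
  | 0, _, s => out s
  | k+1, pos, s =>
    match place pos s with
    | none => pvBestR place out k (pos + 1) s
    | some s2 => max (pvBestR place out k (pos + 1) s) (pvBestR place out k (pos + 1) s2)

theorem pvProcM_even {σ : Type} (place : Int → σ → Option σ) (k : Nat) (pos : Int) (m : Nat) (s : σ) :
    pvProcM place (k+1) pos (2*m) s = pvProcM place k (pos + 1) m s := by
  simp [pvProcM, Nat.mul_mod_right, Nat.mul_div_cancel_left m (by norm_num : 0 < 2)]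

theorem pvProcM_odd {σ : Type} (place : Int → σ → Option σ) (k : Nat) (pos : Int) (m : Nat) (s : σ) :
    pvProcM place (k+1) pos (2*m+1) s = (place pos s).bind (pvProcM place k (pos + 1) m) := by
  have h1 : (2*m+1) % 2 = 1 := by omega
  have h2 : (2*m+1) / 2 = m := by omega
  simp [pvProcM, h1, h2]

theorem pvRange_two_mul (t : Nat) :
    List.range (2 * t) = (List.range t).flatMap (fun m => [2*m, 2*m+1]) := by
  induction t with
  | zero => rfl
  | succ t ih =>
    have h : 2 * (t+1) = (2*t) + 1 + 1 := by ring
    rw [h, List.range_succ, List.range_succ, ih, List.range_succ, List.flatMap_append]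
    simp

theorem pvOut_le_bestR {σ : Type} (place : Int → σ → Option σ) (out : σ → Int) :
    ∀ (k : Nat) (pos : Int) (s : σ), out s ≤ pvBestR place out k pos s := by
  intro k
  induction k with
  | zero => intro pos s; exact le_refl _
  | succ k ih =>
    intro pos s
    rcases hp : place pos s with _ | s2
    · simpa [pvBestR, hp] using ih (pos + 1) s
    · simp only [pvBestR, hp]
      exact le_max_of_le_left (ih (pos + 1) s)

-- the central lemma: folding max over ALL 2^k bit-suffixes of A's greedy decoding equals B's backtracking
theorem pvCore {σ : Type} (place : Int → σ → Option σ) (out : σ → Int) :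
    ∀ (k : Nat) (pos : Int) (s : σ) (acc : Int),
    (List.range (2^k)).foldl (fun a m => pvOptMax a ((pvProcM place k pos m s).map out)) acc
      = max acc (pvBestR place out k pos s) := by
  intro k
  induction k with
  | zero =>
    intro pos s acc
    simp [pvProcM, pvBestR, pvOptMax, List.range_succ]
  | succ k ih =>
    intro pos s acc
    have hp : (2:Nat)^(k+1) = 2 * 2^k := by ring
    rw [hp, pvRange_two_mul, List.foldl_flatMap]
    simp only [List.foldl_cons, List.foldl_nil, pvProcM_even, pvProcM_odd]
    rcases hpl : place pos s with _ | s2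
    · simp only [hpl, Option.bind_none, Option.map_none]
      have : ∀ (a : Int) (m : Nat),
          pvOptMax (pvOptMax a ((pvProcM place k (pos+1) m s).map out)) none
            = pvOptMax a ((pvProcM place k (pos+1) m s).map out) := by
        intro a m; rfl
      simp only [this]
      rw [ih]
      simp [pvBestR, hpl]
    · simp only [hpl, Option.bind_some]
      rw [pvFold_interleave, ih, ih]
      simp only [pvBestR, hpl]
      rw [max_assoc]

-- ---- B's recursion is the model's branching recursion ----
def pvPlaceP (w h_ : Int) (pos : Int) (s : List (List Bool)) : Option (List (List Bool)) :=
  pvPlaceB w h_ s ((PySem.Int.divmod? pos w).getD (0, 0)).1 ((PySem.Int.divmod? pos w).getD (0, 0)).2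

theorem pvGoB_eq_bestR (fields : List (List Int)) (w h_ n : Int) :
    ∀ (k : Nat) (pos : Int) (used : List (List Bool)), (n - pos).toNat = k →
    pvGoB fields w h_ n k pos used
      = pvBestR (pvPlaceP w h_) (pvXorUnusedA fields w h_) k pos used := by
  intro k
  induction k with
  | zero => intro pos used h; rfl
  | succ k ih =>
    intro pos used h
    have hlt : ¬ n ≤ pos := by omega
    simp only [pvGoB, pvBestR, if_neg hlt, pvPlaceP]
    rcases hpl : pvPlaceB w h_ used ((PySem.Int.divmod? pos w).getD (0, 0)).1
        ((PySem.Int.divmod? pos w).getD (0, 0)).2 with _ | placed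
    · simp only [hpl]
      exact ih (pos + 1) used (by omega)
    · simp only [hpl]
      rw [ih (pos + 1) used (by omega), ih (pos + 1) placed (by omega)]

-- ---- A's per-mask double loop is the model's greedy decoding ----
def pvValid (s : List (List Bool) × Bool × Int) : Option (List (List Bool)) :=
  if s.2.1 = true then some s.1 else none

def pvStepIJ (w h_ : Int) (mask : Int) (i j : Int) (u : List (List Bool)) : Option (List (List Bool)) :=
  if (mask.toNat >>> (i * w + j).toNat) &&& 1 = 1 then
    (if j + 1 < w ∧ pvUsedA u i j = false ∧ pvUsedA u i (j + 1) = false then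
      some (pvSetA (pvSetA u i j) i (j + 1))
    else if i + 1 < h_ ∧ pvUsedA u i j = false ∧ pvUsedA u (i + 1) j = false then
      some (pvSetA (pvSetA u i j) (i + 1) j)
    else none)
  else some u

def pvStepAbs (w h_ : Int) (M : Nat) (pos : Int) (u : List (List Bool)) : Option (List (List Bool)) :=
  if (M >>> pos.toNat) &&& 1 = 1 then pvPlaceP w h_ pos u else some u

def pvProcAbs (w h_ : Int) (M : Nat) : Nat → Int → List (List Bool) → Option (List (List Bool))
  | 0, _, u => some u
  | k+1, pos, u => (pvStepAbs w h_ M pos u).bind (pvProcAbs w h_ M k (pos + 1))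

theorem pvFoldBind_none {α β : Type} (g : α → β → Option β) : ∀ (l : List α),
    l.foldl (fun ou x => ou.bind (g x)) none = none := by
  intro l; induction l with
  | nil => rfl
  | cons x t ih => simpa using ih

theorem pvInnerA_invalid (w h_ mask i : Int) (js : List Int) (used : List (List Bool)) (cnt : Int) :
    pvInnerA w h_ mask i js (used, false, cnt) = (used, false, cnt) := by
  cases js <;> simp [pvInnerA]

theorem pvInnerA_fold (w h_ mask i : Int) : ∀ (js : List Int) (used : List (List Bool)) (cnt : Int),
    pvValid (pvInnerA w h_ mask i js (used, true, cnt))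
      = js.foldl (fun ou j => ou.bind (pvStepIJ w h_ mask i j)) (some used) := by
  intro js
  induction js with
  | nil => intro used cnt; rfl
  | cons j t ih =>
    intro used cnt
    simp only [pvInnerA, pvStepIJ, List.foldl_cons, Option.bind_some,
      Bool.true_eq_false, if_false]
    split_ifs with h1 h2 h3
    · exact ih _ _
    · exact ih _ _
    · rw [pvFoldBind_none]; rfl
    · exact ih _ _

theorem pvOuter_fold (w h_ mask : Int) : ∀ (il : List Int) (s : List (List Bool) × Bool × Int),
    pvValid (il.foldl (fun s i => pvInnerA w h_ mask i (PySem.List.pyRange 0 w 1) s) s)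
      = il.foldl (fun ou i => (PySem.List.pyRange 0 w 1).foldl
          (fun ou j => ou.bind (pvStepIJ w h_ mask i j)) ou) (pvValid s) := by
  intro il
  induction il with
  | nil => intro s; rfl
  | cons i t ih =>
    intro s
    obtain ⟨u, v, c⟩ := s
    simp only [List.foldl_cons]
    rw [ih]
    cases v
    · rw [pvInnerA_invalid]
      have : pvValid (u, false, c) = none := rfl
      rw [this, pvFoldBind_none]
    · rw [pvInnerA_fold]
      rfl

theorem pvDivmod_mul_add (i j w : Int) (hw : 0 < w) (h0 : 0 ≤ j) (hj : j < w) :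
    PySem.Int.divmod? (i * w + j) w = some (i, j) := by
  have hfd : PySem.Int.floordiv (i * w + j) w = i := by
    rw [PySem.Int.floordiv_eq_iff_of_pos hw]
    constructor <;> nlinarith
  have hmd : PySem.Int.mod (i * w + j) w = j := by
    have := PySem.Int.floordiv_mul_add_mod (i * w + j) w
    rw [hfd] at this; omega
  have hfd' : (i * w + j).fdiv w = i := hfd
  have hmd' : (i * w + j).fmod w = j := hmd
  simp [PySem.Int.divmod?, hw.ne', hfd', hmd']

theorem pvProcAbs_succ_eq (w h_ : Int) (M : Nat) (k : Nat) (pos : Int) (u : List (List Bool)) :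
    pvProcAbs w h_ M (k+1) pos u = (pvStepAbs w h_ M pos u).bind (pvProcAbs w h_ M k (pos + 1)) := rfl

theorem pvProcAbs_add (w h_ : Int) (M : Nat) : ∀ (k1 k2 : Nat) (pos : Int) (u : List (List Bool)),
    pvProcAbs w h_ M (k1 + k2) pos u
      = (pvProcAbs w h_ M k1 pos u).bind (pvProcAbs w h_ M k2 (pos + (k1:Int))) := by
  intro k1
  induction k1 with
  | zero => intro k2 pos u; simp [pvProcAbs]
  | succ k1 ih =>
    intro k2 pos u
    have h : k1 + 1 + k2 = (k1 + k2) + 1 := by ring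
    rw [h, pvProcAbs_succ_eq, pvProcAbs_succ_eq, Option.bind_assoc]
    apply congrArg
    funext v
    rw [ih]
    have : pos + 1 + (k1:Int) = pos + ((k1:Int) + 1) := by ring
    rw [this]
    push_cast
    ring_nf

theorem pvProcAbs_eq_procM (w h_ : Int) (M : Nat) : ∀ (k : Nat) (pos : Int) (u : List (List Bool)),
    0 ≤ pos →
    pvProcAbs w h_ M k pos u = pvProcM (pvPlaceP w h_) k pos (M >>> pos.toNat) u := by
  intro k
  induction k with
  | zero => intro pos u _; rfl
  | succ k ih =>
    intro pos u hpos
    have hbit : (M >>> pos.toNat) &&& 1 = (M >>> pos.toNat) % 2 := Nat.and_one_is_mod _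
    have hdiv : (M >>> pos.toNat) / 2 = M >>> (pos + 1).toNat := by
      have h1 : (pos + 1).toNat = pos.toNat + 1 := by omega
      rw [h1, Nat.shiftRight_succ]
    simp only [pvProcAbs, pvStepAbs, pvProcM, hbit, hdiv]
    split_ifs with h1
    · cases hpl : pvPlaceP w h_ pos u
      · rfl
      · simp only [Option.bind_some]
        exact ih (pos + 1) _ (by omega)
    · simp only [Option.bind_some]
      exact ih (pos + 1) u (by omega)

theorem pvRow_procAbs (w h_ : Int) (mask : Int) :
    ∀ (k : Nat) (j0 i : Int), 0 ≤ j0 → j0 + (k:Int) ≤ w →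
    ∀ (ou : Option (List (List Bool))),
    (PySem.List.pyRange j0 (j0 + (k:Int)) 1).foldl
        (fun ou j => ou.bind (pvStepIJ w h_ mask i j)) ou
      = ou.bind (pvProcAbs w h_ mask.toNat k (i * w + j0)) := by
  intro k
  induction k with
  | zero =>
    intro j0 i _ _ ou
    rw [PySem.List.pyRange_one_eq_nil (by omega)]
    cases ou <;> rfl
  | succ k ih =>
    intro j0 i h0 hk ou
    have hcons : PySem.List.pyRange j0 (j0 + ((k:Int) + 1)) 1
        = j0 :: PySem.List.pyRange (j0 + 1) (j0 + ((k:Int) + 1)) 1 :=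
      PySem.List.pyRange_one_cons (by omega)
    have harith : j0 + ((k:Int) + 1) = (j0 + 1) + (k:Int) := by ring
    push_cast
    rw [hcons, List.foldl_cons, harith, ih (j0 + 1) i (by omega) (by push_cast at hk ⊢; omega)]
    have hstep : ∀ (u : List (List Bool)),
        pvStepIJ w h_ mask i j0 u = pvStepAbs w h_ mask.toNat (i * w + j0) u := by
      intro u
      have hw : 0 < w := by push_cast at hk; omega
      unfold pvStepIJ pvStepAbs pvPlaceP
      rw [pvDivmod_mul_add i j0 w hw h0 (by push_cast at hk; omega)]
      rfl
    have hpos1 : i * w + (j0 + 1) = (i * w + j0) + 1 := by ring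
    rw [hpos1]
    cases ou with
    | none => rfl
    | some u =>
      simp only [Option.bind_some]
      rw [hstep u]
      rfl

theorem pvOuterAbs (w h_ : Int) (mask : Int) (hw : 0 ≤ w) :
    ∀ (hk : Nat) (i0 : Int) (ou : Option (List (List Bool))),
    (PySem.List.pyRange i0 (i0 + (hk:Int)) 1).foldl
        (fun ou i => (PySem.List.pyRange 0 w 1).foldl
          (fun ou j => ou.bind (pvStepIJ w h_ mask i j)) ou) ou
      = ou.bind (pvProcAbs w h_ mask.toNat (hk * w.toNat) (i0 * w)) := by
  intro hk
  induction hk with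
  | zero =>
    intro i0 ou
    rw [PySem.List.pyRange_one_eq_nil (show i0 + ((0:Nat):Int) ≤ i0 by omega)]
    simp [pvProcAbs]
  | succ hk ih =>
    intro i0 ou
    have hcons : PySem.List.pyRange i0 (i0 + ((hk:Int) + 1)) 1
        = i0 :: PySem.List.pyRange (i0 + 1) (i0 + ((hk:Int) + 1)) 1 :=
      PySem.List.pyRange_one_cons (by omega)
    have harith : i0 + ((hk:Int) + 1) = (i0 + 1) + (hk:Int) := by ring
    push_cast
    rw [hcons, List.foldl_cons, harith, ih (i0 + 1)]
    have hrow := pvRow_procAbs w h_ mask w.toNat 0 i0 le_rfl (by omega) ou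
    rw [show (0:Int) + (w.toNat : Int) = w from by omega] at hrow
    rw [show i0 * w + (0:Int) = i0 * w from by ring] at hrow
    rw [hrow, Option.bind_assoc]
    apply congrArg
    funext u
    have h1 : (hk + 1) * w.toNat = w.toNat + hk * w.toNat := by ring
    rw [h1, pvProcAbs_add]
    have h2 : i0 * w + (w.toNat : Int) = (i0 + 1) * w := by
      have hww : (w.toNat : Int) = w := Int.toNat_of_nonneg hw
      rw [hww]; ring
    rw [h2]

theorem pvMask_valid (w h_ : Int) (hh : 0 ≤ h_) (hw : 0 ≤ w) (mask : Int) :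
    pvValid (pvMaskA w h_ mask)
      = pvProcAbs w h_ mask.toNat (h_.toNat * w.toNat) 0 (pvGridA w h_) := by
  unfold pvMaskA
  rw [pvOuter_fold]
  have hinit : pvValid (pvGridA w h_, true, 0) = some (pvGridA w h_) := rfl
  rw [hinit]
  have hhe : h_ = (0:Int) + (h_.toNat : Int) := by omega
  rw [show PySem.List.pyRange 0 h_ 1 = PySem.List.pyRange 0 ((0:Int) + (h_.toNat : Int)) 1 by rw [← hhe]]
  rw [pvOuterAbs w h_ mask hw h_.toNat 0]
  simp

-- ---- the all-False grid leaves every cell uncovered ----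
theorem pvGrid_false (w h_ : Int) (i j : Int) (hi : i ∈ PySem.List.pyRange 0 h_ 1)
    (hj : j ∈ PySem.List.pyRange 0 w 1) : pvUsedA (pvGridA w h_) i j = false := by
  rw [PySem.List.mem_pyRange_one] at hi hj
  unfold pvUsedA pvGridA
  have hlen : ((PySem.List.pyRange 0 h_ 1).map
      (fun _ => (PySem.List.pyRange 0 w 1).map (fun _ => false))).length = h_.toNat := by
    simp [PySem.List.pyRange_one]
  rw [PySem.List.pyGetD_eq_getElem _ [] hi.1 (by rw [hlen]; omega)]
  rw [List.getElem_map]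
  have hlen2 : ((PySem.List.pyRange 0 w 1).map (fun _ => false)).length = w.toNat := by
    simp [PySem.List.pyRange_one]
  rw [PySem.List.pyGetD_eq_getElem _ false hj.1 (by rw [hlen2]; omega)]
  simp

theorem pvXorAll_eq (fields : List (List Int)) (w h_ : Int) :
    pvXorUnusedA fields w h_ (pvGridA w h_) = pvXorAllA fields w h_ := by
  unfold pvXorUnusedA pvXorAllA
  apply PySem.List.foldl_congr_mem
  intro acc i hi
  apply PySem.List.foldl_congr_mem
  intro acc2 j hj
  rw [pvGrid_false w h_ i j hi hj]
  simp

theorem pvMaskStep (fields : List (List Int)) (w h_ : Int) (mx mask : Int) :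
    (match pvMaskA w h_ mask with
      | (used, valid, _) =>
        if valid = true then max mx (pvXorUnusedA fields w h_ used) else mx)
      = pvOptMax mx ((pvValid (pvMaskA w h_ mask)).map (pvXorUnusedA fields w h_)) := by
  rcases h : pvMaskA w h_ mask with ⟨u, v, c⟩
  cases v <;> simp [pvValid, pvOptMax]

-- ---- degenerate grids (h_ ≤ 0, forced by Pre_ when a dimension is negative): both sides return 0 ----
theorem pvFoldMax0 : ∀ (l : List Int), l.foldl (fun mx (_ : Int) => max mx (0:Int)) 0 = 0 := by
  intro l
  induction l with
  | nil => rfl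
  | cons x t ih => simpa using ih

theorem pvDegenerate_A (fields : List (List Int)) (w h_ : Int) (hh : h_ ≤ 0) :
    get_max_xor fields w h_ = 0 := by
  have hnil : PySem.List.pyRange 0 h_ 1 = [] := PySem.List.pyRange_one_eq_nil (by omega)
  have hxa : pvXorAllA fields w h_ = 0 := by unfold pvXorAllA; rw [hnil]; rfl
  have hmask : ∀ mask, pvMaskA w h_ mask = (pvGridA w h_, true, 0) := by
    intro mask; unfold pvMaskA; rw [hnil]; rfl
  have hxu : ∀ u, pvXorUnusedA fields w h_ u = 0 := by
    intro u; unfold pvXorUnusedA; rw [hnil]; rfl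
  unfold get_max_xor
  rw [PySem.List.foldl_congr_mem _ _ (fun mx (_ : Int) => max mx (0:Int)) _
    (by intro acc x _; rw [hmask x]; simp [hxu])]
  rw [hxa]
  simpa using pvFoldMax0 _

theorem pvDegenerate_goB (fields : List (List Int)) (w h_ n : Int) (hh : h_ ≤ 0) :
    ∀ (k : Nat) (pos : Int) (used : List (List Bool)), pvGoB fields w h_ n k pos used = 0 := by
  have hnil : PySem.List.pyRange 0 h_ 1 = [] := PySem.List.pyRange_one_eq_nil (by omega)
  have hfx : ∀ u, pvXorUnusedA fields w h_ u = 0 := by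
    intro u; unfold pvXorUnusedA; rw [hnil]; rfl
  intro k
  induction k with
  | zero => intro pos used; exact hfx used
  | succ k ih =>
    intro pos used
    simp only [pvGoB]
    split_ifs with h1
    · exact hfx used
    · rcases pvPlaceB w h_ used ((PySem.Int.divmod? pos w).getD (0, 0)).1
          ((PySem.Int.divmod? pos w).getD (0, 0)).2 with _ | placed
      · simp [ih]
      · simp [ih]

theorem pvDegenerate_B (fields : List (List Int)) (w h_ : Int) (hh : h_ ≤ 0) :
    get_max_xor_alt fields w h_ = 0 := by
  unfold get_max_xor_alt
  rw [pvDegenerate_goB fields w h_ _ hh]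
  rfl

-- ---- the main (nonnegative-dimension) case ----
theorem pvMain (fields : List (List Int)) (w h_ : Int) (hh : 0 ≤ h_) (hw : 0 ≤ w) :
    get_max_xor fields w h_ = get_max_xor_alt fields w h_ := by
  have hn : (h_ * w).toNat = h_.toNat * w.toNat := Int.toNat_mul hh hw
  have hstep : ∀ (mx : Int) (m : Nat),
      (match pvMaskA w h_ ((0:Int) + (m:Int)) with
       | (used, valid, _) => if valid = true then max mx (pvXorUnusedA fields w h_ used) else mx)
      = pvOptMax mx ((pvProcM (pvPlaceP w h_) ((h_ * w).toNat) 0 m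
          (pvGridA w h_)).map (pvXorUnusedA fields w h_)) := by
    intro mx m
    rw [pvMaskStep, pvMask_valid w h_ hh hw, ← hn]
    rw [show ((0:Int) + (m:Int)).toNat = m from by omega]
    rw [pvProcAbs_eq_procM w h_ m _ 0 _ le_rfl]
    norm_num
  unfold get_max_xor
  rw [PySem.List.pyRange_one]
  rw [show ((2 ^ (h_ * w).toNat : Nat) : Int) - 0 = ((2 ^ (h_ * w).toNat : Nat) : Int) from by ring]
  rw [Int.toNat_natCast, List.foldl_map]
  rw [PySem.List.foldl_congr_mem _ _
    (fun mx m => pvOptMax mx ((pvProcM (pvPlaceP w h_) ((h_ * w).toNat) 0 m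
      (pvGridA w h_)).map (pvXorUnusedA fields w h_))) _
    (fun acc x _ => hstep acc x)]
  rw [pvCore]
  unfold get_max_xor_alt
  rw [pvGoB_eq_bestR fields w h_ (h_ * w) ((h_ * w).toNat) 0 _ (by omega)]
  rw [← pvXorAll_eq fields w h_]
  rw [max_assoc]
  rw [max_eq_right (pvOut_le_bestR _ _ _ _ _)]
  rfl


-- ===== VERDICT (by name: the statement is the Claim_ definition above) =====
theorem get_max_xor_spec : Claim_equal_get_max_xor := by
  intro fields w h_ _ hpre
  unfold Spec_get_max_xor
  by_cases hcase : 0 ≤ h_ ∧ 0 ≤ w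
  · exact pvMain fields w h_ hcase.1 hcase.2
  · have hh : h_ ≤ 0 := by
      rcases hpre with ⟨h1, -⟩
      by_contra hpos
      push_neg at hpos hcase
      have hw' : w < 0 := hcase (by omega)
      nlinarith
    rw [pvDegenerate_A fields w h_ hh, pvDegenerate_B fields w h_ hh]
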